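-- pv_equiv track=rewrite | github.com/jiyeon2536/algorithm | 프로그래머스/0/181837. 커피 심부름/커피 심부름.py | solution
-- ===== SOURCE A (Python) =====
-- def solution(order):
--     answer = 0
--     for o in order:
--         if 'am' in o:
--             answer += 4500
--         elif 'cafe' in o:
--             answer += 5000
--         else:
--             answer += 4500
--     return answer
-- ===== SOURCE B (Python) =====
-- def solution(order):
--     # Divide and conquer: split the order list in half, price the halves
--     # independently and add; a single order is priced by the menu rule
--     # ('cafe' without 'am' costs 5000, everything else 4500).
--     n = len(order)
--     if n == 0:
--         return 0
--     if n == 1: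
--         o = order[0]
--         return 4500 if 'am' in o or 'cafe' not in o else 5000
--     mid = n // 2
--     return solution(order[:mid]) + solution(order[mid:])
-- ===== Notes on version B (the rewrite author's own statement) =====
-- stated objective: alternative
-- what changed: Replaces A's single left-to-right accumulator loop with a divide-and-conquer recursion that splits the list in half, prices each half independently and adds the results (correct because the total is a sum over independent items).
import Mathlib
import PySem

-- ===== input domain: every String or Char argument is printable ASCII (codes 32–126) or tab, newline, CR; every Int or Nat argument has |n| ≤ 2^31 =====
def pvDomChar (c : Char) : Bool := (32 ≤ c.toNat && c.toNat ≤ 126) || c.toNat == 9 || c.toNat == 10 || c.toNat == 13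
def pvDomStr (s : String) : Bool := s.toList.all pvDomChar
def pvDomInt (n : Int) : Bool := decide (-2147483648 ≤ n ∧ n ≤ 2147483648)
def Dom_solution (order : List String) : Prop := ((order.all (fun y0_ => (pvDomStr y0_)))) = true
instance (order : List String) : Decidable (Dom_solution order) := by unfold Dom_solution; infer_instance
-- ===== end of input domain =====

-- B replaces A's left-to-right accumulator loop with a divide-and-conquer recursion
-- that splits the list in half and adds the two halves' totals (objective: alternative).

-- ===== PORT A =====
def solution (order : List String) : Int :=
  order.foldl
    (fun answer o =>
      if PySem.Str.isIn "am" o then answer + 4500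
      else if PySem.Str.isIn "cafe" o then answer + 5000
      else answer + 4500)
    0

-- ===== PORT B =====
def solution_alt (order : List String) : Int :=
  if order.length = 0 then 0
  else if order.length = 1 then
    let o := order.headD ""
    if PySem.Str.isIn "am" o || !PySem.Str.isIn "cafe" o then 4500 else 5000
  else
    let mid : Nat := order.length / 2
    solution_alt (PySem.List.slice order none (some (mid : Int))) +
      solution_alt (PySem.List.slice order (some (mid : Int)) none)
termination_by order.length
decreasing_by
  · rw [PySem.List.slice_to_natCast]; simp [List.length_take]; omega
  · rw [PySem.List.slice_from_natCast]; simp [List.length_drop]; omega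

-- ===== PRECONDITION & SPEC =====
def Spec_solution (order : List String) (out : Int) : Prop := out = solution_alt order
instance (order : List String) (out : Int) : Decidable (Spec_solution order out) := by unfold Spec_solution; infer_instance

-- ===== CLAIM (what is proved, stated in full; the proofs are below) =====
def Claim_equal_solution : Prop := ∀ (order : List String), Dom_solution order → Spec_solution order (solution order)

-- ===== LEMMAS AND PROOFS =====

-- The closed-form value both ports equal: 4500 per order, plus 500 for each
-- order containing 'cafe' but not 'am'.
def pvClosed (order : List String) : Int :=
  4500 * (order.length : Int) +
    500 * ((order.countP (fun o => PySem.Str.isIn "cafe" o && !PySem.Str.isIn "am" o) : Int))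

-- A's fold, from any accumulator, equals accumulator + closed form.
theorem solution_foldl_acc (order : List String) : ∀ (acc : Int),
    order.foldl
      (fun answer o =>
        if PySem.Str.isIn "am" o then answer + 4500
        else if PySem.Str.isIn "cafe" o then answer + 5000
        else answer + 4500)
      acc
    = acc + pvClosed order := by
  induction order with
  | nil => intro acc; simp [pvClosed]
  | cons o rest ih =>
    intro acc
    rw [List.foldl_cons]
    by_cases ham : PySem.Str.isIn "am" o = true
    · have ham2 : PySem.Chars.isIn ['a','m'] o.toList = true := ham
      rw [if_pos ham, ih]; simp [pvClosed, ham2]; ring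
    · by_cases hcafe : PySem.Str.isIn "cafe" o = true
      · have ham2 : PySem.Chars.isIn ['a','m'] o.toList = false := Bool.eq_false_iff.mpr ham
        have hcafe2 : PySem.Chars.isIn ['c','a','f','e'] o.toList = true := hcafe
        rw [if_neg ham, if_pos hcafe, ih]
        simp [pvClosed, ham2, hcafe2]; ring
      · have hcafe2 : PySem.Chars.isIn ['c','a','f','e'] o.toList = false := Bool.eq_false_iff.mpr hcafe
        rw [if_neg ham, if_neg hcafe, ih]
        simp [pvClosed, hcafe2]; ring

-- B's divide-and-conquer recursion equals the closed form.
theorem solution_alt_closed (order : List String) : solution_alt order = pvClosed order := by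
  induction order using solution_alt.induct with
  | case1 x h0 =>
    have : x = [] := List.length_eq_zero_iff.mp h0
    subst this; rw [solution_alt]; simp [pvClosed]
  | case2 x h0 h1 o0 hc =>
    obtain ⟨o, rfl⟩ := List.length_eq_one_iff.mp h1
    have hc' : (PySem.Str.isIn "am" o || !PySem.Str.isIn "cafe" o) = true := hc
    rw [solution_alt]
    simp only [List.headD_cons, List.length_cons, List.length_nil]
    norm_num [hc']
    rcases Bool.or_eq_true_iff.mp hc' with h | h
    · have h2 : PySem.Chars.isIn ['a','m'] o.toList = true := h
      simp [pvClosed, h2]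
    · have h2 : PySem.Chars.isIn ['c','a','f','e'] o.toList = false := by simpa using h
      simp [pvClosed, h2]
  | case3 x h0 h1 o0 hc =>
    obtain ⟨o, rfl⟩ := List.length_eq_one_iff.mp h1
    have hf : (PySem.Str.isIn "am" o || !PySem.Str.isIn "cafe" o) = false :=
      Bool.eq_false_iff.mpr hc
    rw [solution_alt]
    simp only [List.headD_cons, List.length_cons, List.length_nil]
    norm_num [hf]
    have hp := Bool.or_eq_false_iff.mp hf
    have h1' : PySem.Chars.isIn ['a','m'] o.toList = false := hp.1
    have h2' : PySem.Chars.isIn ['c','a','f','e'] o.toList = true := by simpa using hp.2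
    simp [pvClosed, h1', h2']
  | case4 x h0 h1 mid ih1 ih2 =>
    rw [solution_alt]
    rw [if_neg h0, if_neg h1]
    simp only [PySem.List.slice_to_natCast, PySem.List.slice_from_natCast] at ih1 ih2 ⊢
    simp only [show mid = x.length / 2 from rfl] at ih1 ih2 ⊢
    rw [ih1, ih2]
    unfold pvClosed
    have hsplit : x = x.take (x.length / 2) ++ x.drop (x.length / 2) :=
      (List.take_append_drop _ _).symm
    rw [show x.countP (fun o => PySem.Str.isIn "cafe" o && !PySem.Str.isIn "am" o)
        = (x.take (x.length / 2)).countP (fun o => PySem.Str.isIn "cafe" o && !PySem.Str.isIn "am" o)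
          + (x.drop (x.length / 2)).countP (fun o => PySem.Str.isIn "cafe" o && !PySem.Str.isIn "am" o)
      from by conv_lhs => rw [hsplit, List.countP_append]]
    simp only [List.length_take, List.length_drop]
    have hm : min (x.length / 2) x.length = x.length / 2 := by omega
    rw [hm]
    push_cast [Nat.sub_le]
    ring_nf
    omega

-- ===== VERDICT (by name: the statement is the Claim_ definition above) =====
theorem solution_spec : Claim_equal_solution := by
  intro order _
  unfold Spec_solution
  rw [solution_alt_closed]
  simpa using solution_foldl_acc order 0
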